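-- pv_equiv track=rewrite | github.com/pixuan1989/dao-essence-shop | fix_social3.py | find_and_comment_footer_social
-- ===== SOURCE A (Python) =====
-- def find_and_comment_footer_social(lines):
--     """找到所有未被 HTML 注释包裹的 footer-social div，整块注释掉"""
--     new_lines = []
--     i = 0
--     changed = False
--
--     while i < len(lines):
--         line = lines[i]
--         s = line.strip()
--
--         # 检测未注释的 footer-social 起始 div
--         if "footer-social" in line and "<div" in line and not s.startswith("<!--"):
--             # 向前检查是否已被注释包围
--             already_commented = False
--             for back in range(max(0, i-5), i):
--                 if "WA-TG-SOCIAL-START" in lines[back] or "SOCIAL-ICONS-START" in lines[back]: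
--                     already_commented = True
--                     break
--
--             if already_commented:
--                 new_lines.append(line)
--                 i += 1
--                 continue
--
--             # 找到这个 div 块的结束位置
--             indent = line[:len(line) - len(line.lstrip())]
--             depth = 0
--             start_i = i
--             block_lines = []
--
--             while i < len(lines):
--                 l = lines[i]
--                 depth += l.count("<div") - l.count("</div>")
--                 block_lines.append(l)
--                 i += 1
--                 if depth <= 0:
--                     break
--
--             # 输出注释块
--             new_lines.append(f"{indent}<!-- WA-TG-SOCIAL-START: uncomment when accounts ready\n")
--             new_lines.extend(block_lines)
--             new_lines.append(f"{indent}WA-TG-SOCIAL-END -->\n")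
--             changed = True
--             continue
--
--         new_lines.append(line)
--         i += 1
--
--     return new_lines, changed
-- ===== SOURCE B (Python) =====
-- def find_and_comment_footer_social(lines):
--     """Two-pass rewrite: first detect the spans to wrap, then emit the output."""
--     n = len(lines)
--     # pass 1: collect (start, indent, end) for every block to be commented out
--     spans = []
--     i = 0
--     while i < n:
--         line = lines[i]
--         if ("footer-social" in line and "<div" in line
--                 and not line.strip().startswith("<!--")
--                 and not any("WA-TG-SOCIAL-START" in lines[b] or "SOCIAL-ICONS-START" in lines[b]
--                             for b in range(max(0, i - 5), i))):
--             indent = line[:len(line) - len(line.lstrip())]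
--             depth = 0
--             j = i
--             while j < n:
--                 depth += lines[j].count("<div") - lines[j].count("</div>")
--                 j += 1
--                 if depth <= 0:
--                     break
--             spans.append((i, indent, j))
--             i = j
--         else:
--             i += 1
--     # pass 2: emit, splicing in comment markers at each recorded span
--     out = []
--     pos = 0
--     for start, indent, end in spans:
--         out.extend(lines[pos:start])
--         out.append(f"{indent}<!-- WA-TG-SOCIAL-START: uncomment when accounts ready\n")
--         out.extend(lines[start:end])
--         out.append(f"{indent}WA-TG-SOCIAL-END -->\n")
--         pos = end
--     out.extend(lines[pos:])
--     return out, bool(spans)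
-- ===== Notes on version B (the rewrite author's own statement) =====
-- stated objective: alternative
-- what changed: A's single interleaved while-loop that detects blocks and emits output line by line is split into a detection pass recording (start, indent, end) spans and a separate emission pass that splices the comment markers between bulk slices of the original lines.
import Mathlib
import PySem

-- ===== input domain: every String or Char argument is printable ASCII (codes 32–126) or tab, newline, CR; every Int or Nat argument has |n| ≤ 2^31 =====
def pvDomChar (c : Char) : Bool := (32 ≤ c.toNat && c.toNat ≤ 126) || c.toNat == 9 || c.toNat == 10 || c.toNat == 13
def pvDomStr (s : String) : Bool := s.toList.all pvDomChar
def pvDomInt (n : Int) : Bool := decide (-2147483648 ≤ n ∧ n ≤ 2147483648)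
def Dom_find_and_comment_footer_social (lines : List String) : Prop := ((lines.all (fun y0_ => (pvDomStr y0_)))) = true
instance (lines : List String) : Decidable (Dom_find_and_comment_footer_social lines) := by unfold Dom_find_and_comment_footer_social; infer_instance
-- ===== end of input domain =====

-- B replaces A's single interleaved scan by a detect-spans pass plus a separate emit pass (objective: alternative decomposition, same cost).
-- Both while-loops are ported with a fuel counter (lines.length suffices: every iteration advances i by at least 1);
-- fuel is only a totality guard, never reached while i < length.

-- shared small helpers (identical intermediate values in both Pythons):
-- detection:  "footer-social" in line and "<div" in line and not line.strip().startswith("<!--")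
def pvDetect (line : String) : Bool :=
  PySem.Str.isIn "footer-social" line && PySem.Str.isIn "<div" line &&
    !(PySem.Str.startswith (PySem.Str.strip line) "<!--")

-- back-check over range(max(0, i-5), i) = (List.range i).drop (i - 5) (Nat subtraction truncates at 0 = max);
-- b < i ≤ len lines, so getD is in range.  A's for-with-break over it = any.
def pvBackCheck (lines : List String) (i : Nat) : Bool :=
  ((List.range i).drop (i - 5)).any (fun b =>
    PySem.Str.isIn "WA-TG-SOCIAL-START" (lines.getD b "") ||
    PySem.Str.isIn "SOCIAL-ICONS-START" (lines.getD b ""))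

-- indent = line[:len(line) - len(line.lstrip())]  (a nonnegative head slice = take)
def pvIndentOf (line : String) : String :=
  String.ofList (line.toList.take (line.toList.length - (PySem.Str.lstrip line).toList.length))

def pvHdr (indent : String) : String := indent ++ "<!-- WA-TG-SOCIAL-START: uncomment when accounts ready\n"
def pvFtr (indent : String) : String := indent ++ "WA-TG-SOCIAL-END -->\n"

-- l.count("<div") - l.count("</div>")
def pvDivCnt (l : String) : Int := (PySem.Str.count l "<div" : Int) - (PySem.Str.count l "</div>" : Int)

-- ===== PORT A =====
-- A's inner while: appends lines to block_lines until depth <= 0 (or end of input), returns (block_lines, i)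
def pvConsumeA (lines : List String) : Nat → Nat → Int → List String → List String × Nat
  | 0, i, _, block => (block, i)
  | fuel + 1, i, depth, block =>
    if h : i < lines.length then
      if depth + pvDivCnt lines[i] ≤ 0 then (block ++ [lines[i]], i + 1)
      else pvConsumeA lines fuel (i + 1) (depth + pvDivCnt lines[i]) (block ++ [lines[i]])
    else (block, i)

-- A's outer while over i, building new_lines and changed as it goes
def pvLoopA (lines : List String) : Nat → Nat → List String → Bool → List String × Bool
  | 0, _, acc, changed => (acc, changed)
  | fuel + 1, i, acc, changed =>
    if h : i < lines.length then
      if pvDetect lines[i] then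
        if pvBackCheck lines i then
          pvLoopA lines fuel (i + 1) (acc ++ [lines[i]]) changed
        else
          pvLoopA lines fuel (pvConsumeA lines lines.length i 0 []).2
            (acc ++ [pvHdr (pvIndentOf lines[i])] ++ (pvConsumeA lines lines.length i 0 []).1 ++
              [pvFtr (pvIndentOf lines[i])]) true
      else
        pvLoopA lines fuel (i + 1) (acc ++ [lines[i]]) changed
    else (acc, changed)

def find_and_comment_footer_social (lines : List String) : List String × Bool :=
  pvLoopA lines lines.length 0 [] false

-- ===== PORT B =====
-- B's inner while: only tracks the end index of the div block
def pvConsumeB (lines : List String) : Nat → Nat → Int → Nat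
  | 0, i, _ => i
  | fuel + 1, i, depth =>
    if h : i < lines.length then
      if depth + pvDivCnt lines[i] ≤ 0 then i + 1
      else pvConsumeB lines fuel (i + 1) (depth + pvDivCnt lines[i])
    else i

-- pass 1: record (start, indent, end) of every block to comment out
def pvSpansB (lines : List String) : Nat → Nat → List (Nat × String × Nat)
  | 0, _ => []
  | fuel + 1, i =>
    if h : i < lines.length then
      if pvDetect lines[i] && !pvBackCheck lines i then
        (i, pvIndentOf lines[i], pvConsumeB lines lines.length i 0) ::
          pvSpansB lines fuel (pvConsumeB lines lines.length i 0)
      else pvSpansB lines fuel (i + 1)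
    else []

-- pass 2: copy lines, splicing in the comment markers at each recorded span
def pvEmitB (lines : List String) : List (Nat × String × Nat) → Nat → List String
  | [], pos => lines.drop pos
  | (s, ind, e) :: rest, pos =>
      ((lines.drop pos).take (s - pos)) ++
        pvHdr ind :: (((lines.drop s).take (e - s)) ++ pvFtr ind :: pvEmitB lines rest e)

def find_and_comment_footer_social_alt (lines : List String) : List String × Bool :=
  let spans := pvSpansB lines lines.length 0
  (pvEmitB lines spans 0, !spans.isEmpty)

-- ===== PRECONDITION & SPEC =====
def Spec_find_and_comment_footer_social (lines : List String) (out : List String × Bool) : Prop := out = find_and_comment_footer_social_alt lines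
instance (lines : List String) (out : List String × Bool) : Decidable (Spec_find_and_comment_footer_social lines out) := by unfold Spec_find_and_comment_footer_social; infer_instance

-- ===== CLAIM (what is proved, stated in full; the proofs are below) =====
def Claim_equal_find_and_comment_footer_social : Prop := ∀ (lines : List String), Dom_find_and_comment_footer_social lines → Spec_find_and_comment_footer_social lines (find_and_comment_footer_social lines)

-- ===== LEMMAS AND PROOFS =====

-- the inner loops never move i backwards, and strictly advance it given any fuel
theorem pvConsumeB_ge (lines : List String) (fuel i : Nat) (depth : Int) :
    i ≤ pvConsumeB lines fuel i depth := by
  induction fuel generalizing i depth with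
  | zero => simp [pvConsumeB]
  | succ fuel ih =>
    rw [pvConsumeB]
    split
    · split
      · omega
      · have := ih (i + 1) (depth + pvDivCnt lines[i])
        omega
    · omega

theorem pvConsumeB_gt (lines : List String) (fuel i : Nat) (depth : Int)
    (h : i < lines.length) (hf : 1 ≤ fuel) : i + 1 ≤ pvConsumeB lines fuel i depth := by
  obtain ⟨fuel, rfl⟩ : ∃ f, fuel = f + 1 := ⟨fuel - 1, by omega⟩
  rw [pvConsumeB]
  simp only [h, dite_true]
  split
  · omega
  · have := pvConsumeB_ge lines fuel (i + 1) (depth + pvDivCnt lines[i])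
    omega

-- A's inner loop returns the slice lines[i:j] together with j = B's end index
theorem pvConsumeA_eq (lines : List String) (fuel i : Nat) (depth : Int) (block : List String) :
    pvConsumeA lines fuel i depth block =
      (block ++ (lines.drop i).take (pvConsumeB lines fuel i depth - i),
       pvConsumeB lines fuel i depth) := by
  induction fuel generalizing i depth block with
  | zero => simp [pvConsumeA, pvConsumeB]
  | succ fuel ih =>
    rw [pvConsumeA, pvConsumeB]
    split
    · rename_i h
      have hdrop : lines.drop i = lines[i] :: lines.drop (i + 1) := (List.getElem_cons_drop h).symm
      split
      · have h1 : i + 1 - i = 1 := by omega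
        rw [h1, hdrop]
        simp only [List.take_succ_cons, List.take_zero]
      · rw [ih]
        have hge := pvConsumeB_ge lines fuel (i + 1) (depth + pvDivCnt lines[i])
        have h1 : pvConsumeB lines fuel (i + 1) (depth + pvDivCnt lines[i]) - i
            = pvConsumeB lines fuel (i + 1) (depth + pvDivCnt lines[i]) - (i + 1) + 1 := by omega
        rw [h1, hdrop]
        simp only [List.take_succ_cons, List.append_assoc, List.singleton_append]
    · simp

-- every recorded span starts at or after the scan position
theorem pvSpansB_ge (lines : List String) (fuel i : Nat) :
    ∀ sp ∈ pvSpansB lines fuel i, i ≤ sp.1 := by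
  induction fuel generalizing i with
  | zero => simp [pvSpansB]
  | succ fuel ih =>
    intro sp hsp
    rw [pvSpansB] at hsp
    split at hsp
    · split at hsp
      · rcases List.mem_cons.mp hsp with rfl | hsp
        · simp
        · have h1 := ih _ sp hsp
          have h2 := pvConsumeB_ge lines lines.length i 0
          omega
      · have := ih _ sp hsp
        omega
    · simp at hsp

-- emitting from pos = i is the line at i followed by emitting from i+1, when every span starts later
theorem pvEmitB_shift (lines : List String) (sps : List (Nat × String × Nat)) (i : Nat)
    (h : i < lines.length) (hs : ∀ sp ∈ sps, i + 1 ≤ sp.1) :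
    pvEmitB lines sps i = lines[i] :: pvEmitB lines sps (i + 1) := by
  have hdrop : lines.drop i = lines[i] :: lines.drop (i + 1) := (List.getElem_cons_drop h).symm
  cases sps with
  | nil => simp only [pvEmitB]; rw [hdrop]
  | cons sp rest =>
    obtain ⟨s, ind, e⟩ := sp
    have hs1 : i + 1 ≤ s := hs (s, ind, e) (List.mem_cons_self ..)
    have h1 : s - i = (s - (i + 1)) + 1 := by omega
    simp only [pvEmitB]
    rw [h1, hdrop]
    simp only [List.take_succ_cons, List.cons_append]

-- the fused loop of A equals B's detect-then-emit decomposition, with accumulators generalized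
theorem pvLoopA_eq (lines : List String) (fuel i : Nat) (acc : List String) (changed : Bool)
    (hf : lines.length ≤ fuel + i) :
    pvLoopA lines fuel i acc changed =
      (acc ++ pvEmitB lines (pvSpansB lines fuel i) i,
       changed || !(pvSpansB lines fuel i).isEmpty) := by
  induction fuel generalizing i acc changed with
  | zero =>
    simp only [pvLoopA, pvSpansB, pvEmitB]
    rw [List.drop_eq_nil_of_le (by omega)]
    simp
  | succ fuel ih =>
    rw [pvLoopA, pvSpansB]
    split
    · rename_i h
      by_cases hdet : pvDetect lines[i]
      · by_cases hback : pvBackCheck lines i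
        · -- detected but already commented: skip, spans unchanged
          rw [if_pos hdet, if_pos hback, if_neg (by simp [hdet, hback]),
            ih (i + 1) _ _ (by omega),
            pvEmitB_shift lines (pvSpansB lines fuel (i + 1)) i h (pvSpansB_ge lines fuel (i + 1))]
          simp
        · -- new span: A emits hdr/block/ftr inline; B records (i, indent, j)
          rw [if_pos hdet, if_neg hback, if_pos (by simp [hdet, hback])]
          have hgt := pvConsumeB_gt lines lines.length i 0 h (by omega)
          rw [pvConsumeA_eq]
          rw [ih (pvConsumeB lines lines.length i 0) _ _ (by omega)]
          simp only [pvEmitB, List.isEmpty_cons, Bool.not_false, Bool.or_true, Bool.true_or,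
            Nat.sub_self, List.take_zero, List.nil_append, List.append_assoc,
            List.cons_append]
      · -- no detection: plain copy
        rw [if_neg hdet, if_neg (by simp [hdet]),
          ih (i + 1) _ _ (by omega),
          pvEmitB_shift lines (pvSpansB lines fuel (i + 1)) i h (pvSpansB_ge lines fuel (i + 1))]
        simp
    · simp only [pvEmitB]
      rw [List.drop_eq_nil_of_le (by omega)]
      simp

-- ===== VERDICT (by name: the statement is the Claim_ definition above) =====
theorem find_and_comment_footer_social_spec : Claim_equal_find_and_comment_footer_social := by
  intro lines _
  unfold Spec_find_and_comment_footer_social find_and_comment_footer_social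
    find_and_comment_footer_social_alt
  rw [pvLoopA_eq lines lines.length 0 [] false (by omega)]
  simp
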